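-- pv_equiv track=rewrite | github.com/tungsten-ai/tungstenkit | tungstenkit/_internal/utils/version.py | intersect_release_segment_sets
-- ===== SOURCE A (Python) =====
-- import typing as t
--
-- def intersect_release_segment_sets(
--     list_release_segment_sets: t.Sequence[t.Set[t.Optional[int]]],
-- ) -> t.Set[t.Optional[int]]:
--     """
--     Interset while treating a set containing None (any version) as the union of all non-none values
--     """
--     assert len(list_release_segment_sets) > 0
--
--     if len(list_release_segment_sets) == 1:
--         return list_release_segment_sets[0]
--
--     if any(len(ver_set) == 0 for ver_set in list_release_segment_sets):
--         return set()
--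
--     # [{None}, {None}, ...]
--     if all(len(ver_set) == 1 and None in ver_set for ver_set in list_release_segment_sets):
--         return list_release_segment_sets[0]
--
--     union = list_release_segment_sets[0].union(*list_release_segment_sets[1:])
--     intersected = (
--         union if None in list_release_segment_sets[0] else set(list_release_segment_sets[0])
--     )
--     for ver_set in list_release_segment_sets:
--         if None not in ver_set:
--             intersected = intersected.intersection(ver_set)
--
--     return intersected
-- ===== SOURCE B (Python) =====
-- def intersect_release_segment_sets(list_release_segment_sets):
--     """Counting algorithm: tally, per element, in how many None-free sets it
--     occurs; an element survives iff its tally equals the number of None-free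
--     sets (when there are none, every element survives, i.e. the union)."""
--     assert len(list_release_segment_sets) > 0
--     counts = {}
--     n_concrete = 0
--     for ver_set in list_release_segment_sets:
--         if None not in ver_set:
--             n_concrete += 1
--             for x in ver_set:
--                 counts[x] = counts.get(x, 0) + 1
--     result = set()
--     for ver_set in list_release_segment_sets:
--         for x in ver_set:
--             if counts.get(x, 0) == n_concrete:
--                 result.add(x)
--     return result
-- ===== Notes on version B (the rewrite author's own statement) =====
-- stated objective: alternative
-- what changed: B replaces A's chain of special cases plus iterated set union/intersection by a counting algorithm: one pass tallies, in a dict, how many None-free sets contain each element, and a second pass keeps exactly the elements whose tally equals the number of None-free sets (when that number is 0 every element survives, giving the wildcard union).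
import Mathlib
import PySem

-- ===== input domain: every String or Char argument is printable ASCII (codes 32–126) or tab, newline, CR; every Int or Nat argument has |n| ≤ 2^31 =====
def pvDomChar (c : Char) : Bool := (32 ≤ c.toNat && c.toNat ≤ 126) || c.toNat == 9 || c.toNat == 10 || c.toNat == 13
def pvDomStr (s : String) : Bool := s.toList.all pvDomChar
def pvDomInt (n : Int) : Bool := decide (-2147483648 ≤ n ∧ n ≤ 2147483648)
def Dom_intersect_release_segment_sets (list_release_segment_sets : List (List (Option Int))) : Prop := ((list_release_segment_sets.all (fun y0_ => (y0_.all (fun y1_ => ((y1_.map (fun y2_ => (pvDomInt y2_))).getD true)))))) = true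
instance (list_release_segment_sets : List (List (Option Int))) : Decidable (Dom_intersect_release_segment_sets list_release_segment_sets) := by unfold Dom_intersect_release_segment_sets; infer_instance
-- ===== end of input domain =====

-- B replaces A's special cases and iterated set union/intersection by a counting
-- algorithm (tally per element how many None-free sets contain it); objective: alternative.

-- ===== PORT A =====
def intersect_release_segment_sets (list_release_segment_sets : List (List (Option Int))) : List (Option Int) :=
  match list_release_segment_sets with
  | [] => []  -- assert len(...) > 0 fails: AssertionError, excluded by Pre_
  | first :: rest =>
    if (first :: rest).length == 1 then first
    else if (first :: rest).any (fun ver_set => ver_set.length == 0) then []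
    else if (first :: rest).all (fun ver_set => ver_set.length == 1 && PySem.Set.contains ver_set none) then first
    else
      let union := rest.foldl PySem.Set.union first
      let intersected := if PySem.Set.contains first none then union else PySem.Set.ofList first
      (first :: rest).foldl
        (fun acc ver_set => if PySem.Set.contains ver_set none then acc else PySem.Set.inter acc ver_set)
        intersected

-- ===== PORT B =====
def intersect_release_segment_sets_alt (list_release_segment_sets : List (List (Option Int))) : List (Option Int) :=
  let cn := list_release_segment_sets.foldl
    (fun (p : PySem.Dict (Option Int) Int × Int) ver_set =>
      if PySem.Set.contains ver_set none then p
      else (ver_set.foldl (fun d x => d.insert x (d.getD x 0 + 1)) p.1, p.2 + 1))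
    (PySem.Dict.empty, 0)
  list_release_segment_sets.foldl
    (fun res ver_set =>
      ver_set.foldl (fun res x => if cn.1.getD x 0 == cn.2 then PySem.Set.add res x else res) res)
    PySem.Set.empty

-- ===== PRECONDITION & SPEC =====
-- Pre_ excludes the empty list (A's assert raises AssertionError there; B's assert raises too)
-- and inner lists with duplicate elements, which are not valid encodings of the Python set arguments.
def Pre_intersect_release_segment_sets (list_release_segment_sets : List (List (Option Int))) : Prop :=
  list_release_segment_sets ≠ [] ∧ ∀ s ∈ list_release_segment_sets, s.Nodup
instance (list_release_segment_sets : List (List (Option Int))) : Decidable (Pre_intersect_release_segment_sets list_release_segment_sets) := by unfold Pre_intersect_release_segment_sets; infer_instance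
def pvWitness_intersect_release_segment_sets : List (List (Option Int)) := [[none, some 1, some 2], [some 2, some 3]]

def Spec_intersect_release_segment_sets (list_release_segment_sets : List (List (Option Int))) (out : List (Option Int)) : Prop := out = intersect_release_segment_sets_alt list_release_segment_sets
instance (list_release_segment_sets : List (List (Option Int))) (out : List (Option Int)) : Decidable (Spec_intersect_release_segment_sets list_release_segment_sets out) := by unfold Spec_intersect_release_segment_sets; infer_instance

-- ===== CLAIM (what is proved, stated in full; the proofs are below) =====
def Claim_equal_intersect_release_segment_sets : Prop := ∀ (list_release_segment_sets : List (List (Option Int))), Dom_intersect_release_segment_sets list_release_segment_sets → Pre_intersect_release_segment_sets list_release_segment_sets → Spec_intersect_release_segment_sets list_release_segment_sets (intersect_release_segment_sets list_release_segment_sets)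

-- ===== LEMMAS AND PROOFS =====

-- survival predicate: x is in every None-free input set
def pvMemAll (L : List (List (Option Int))) (x : Option Int) : Bool :=
  L.all (fun s => PySem.Set.contains s none || PySem.Set.contains s x)

-- the union of all input sets, in first-insertion order
def pvU (L : List (List (Option Int))) : List (Option Int) :=
  (L.flatten).foldl PySem.Set.add []

-- a conditional set-add loop is a filter of the unconditional one
lemma pv_condAdd_filter (p : Option Int → Bool) :
    ∀ (l A B : List (Option Int)), A = B.filter p →
    l.foldl (fun acc x => if p x then PySem.Set.add acc x else acc) A
      = (l.foldl PySem.Set.add B).filter p := by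
  intro l
  induction l with
  | nil => intro A B h; simpa using h
  | cons x l ih =>
    intro A B h
    simp only [List.foldl_cons]
    apply ih
    by_cases hx : x ∈ B
    · rw [PySem.Set.add_of_mem hx]
      by_cases hp : p x = true
      · rw [if_pos hp, PySem.Set.add_of_mem]
        · exact h
        · rw [h]; exact List.mem_filter.mpr ⟨hx, hp⟩
      · rw [if_neg hp]; exact h
    · rw [PySem.Set.add_of_not_mem hx, List.filter_append]
      by_cases hp : p x = true
      · rw [if_pos hp, PySem.Set.add_of_not_mem, h]
        · simp [hp]
        · rw [h]; intro hc; exact hx (List.mem_filter.mp hc).1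
      · rw [if_neg hp, h]; simp [hp]

-- A's intersection loop is a filter by pvMemAll
lemma pv_interloop_filter :
    ∀ (M : List (List (Option Int))) (acc : List (Option Int)),
    M.foldl (fun acc s => if PySem.Set.contains s none then acc else PySem.Set.inter acc s) acc
      = acc.filter (fun x => pvMemAll M x) := by
  intro M
  induction M with
  | nil => intro acc; simp [pvMemAll]
  | cons s M ih =>
    intro acc
    simp only [List.foldl_cons]
    by_cases hc : PySem.Set.contains s none = true
    · rw [if_pos hc, ih]
      have hm : none ∈ s := (PySem.Set.contains_iff s none).mp hc
      apply List.filter_congr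
      intro x _
      simp [pvMemAll, hm]
    · rw [if_neg hc, ih]
      show (PySem.Set.inter acc s).filter _ = _
      rw [show PySem.Set.inter acc s = acc.filter (fun x => PySem.Set.contains s x) from rfl,
        List.filter_filter]
      have hm : none ∉ s := fun h => hc ((PySem.Set.contains_iff s none).mpr h)
      apply List.filter_congr
      intro x _
      simp [pvMemAll, hm, Bool.and_comm]

-- fold of Set.union over a list of sets = fold of Set.add over its flatten
lemma pv_unionfold :
    ∀ (M : List (List (Option Int))) (acc : List (Option Int)),
    M.foldl PySem.Set.union acc = (M.flatten).foldl PySem.Set.add acc := by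
  intro M
  induction M with
  | nil => intro acc; rfl
  | cons s M ih =>
    intro acc
    simp only [List.foldl_cons, List.flatten_cons, List.foldl_append]
    rw [ih]
    rfl

-- fold of Set.add appends only new elements
lemma pv_foldl_add_ext :
    ∀ (l acc : List (Option Int)), ∃ ext, l.foldl PySem.Set.add acc = acc ++ ext ∧ ∀ x ∈ ext, x ∉ acc := by
  intro l
  induction l with
  | nil => intro acc; exact ⟨[], by simp⟩
  | cons x l ih =>
    intro acc
    simp only [List.foldl_cons]
    by_cases hx : x ∈ acc
    · rw [PySem.Set.add_of_mem hx]; exact ih acc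
    · rw [PySem.Set.add_of_not_mem hx]
      obtain ⟨ext, he, hd⟩ := ih (acc ++ [x])
      refine ⟨x :: ext, by simpa using he, ?_⟩
      intro y hy
      rcases List.mem_cons.mp hy with rfl | hy
      · exact hx
      · intro hc; exact hd y hy (List.mem_append_left _ hc)

lemma pv_foldl_add_of_subset (l acc : List (Option Int)) (h : ∀ x ∈ l, x ∈ acc) :
    l.foldl PySem.Set.add acc = acc := by
  induction l with
  | nil => rfl
  | cons x l ih =>
    simp only [List.foldl_cons]
    rw [PySem.Set.add_of_mem (h x (by simp))]
    exact ih (fun y hy => h y (by simp [hy]))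

-- pvMemAll over L = all over the None-free sets
lemma pv_memAll_filter (L : List (List (Option Int))) (x : Option Int) :
    pvMemAll L x = (L.filter (fun s => !PySem.Set.contains s none)).all (fun s => PySem.Set.contains s x) := by
  induction L with
  | nil => rfl
  | cons s L ih =>
    by_cases hc : PySem.Set.contains s none = true
    · have hm : none ∈ s := (PySem.Set.contains_iff s none).mp hc
      simp only [pvMemAll, List.all_cons] at ih ⊢
      simp [hm]
    · have hm : none ∉ s := fun h => hc ((PySem.Set.contains_iff s none).mpr h)
      simp only [pvMemAll, List.all_cons] at ih ⊢
      simp [hm]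

-- the counting loop of B, characterised
lemma pv_counts (x : Option Int) :
    ∀ (M : List (List (Option Int))) (p : PySem.Dict (Option Int) Int × Int),
    (M.foldl (fun (p : PySem.Dict (Option Int) Int × Int) ver_set =>
        if PySem.Set.contains ver_set none then p
        else (ver_set.foldl (fun d x => d.insert x (d.getD x 0 + 1)) p.1, p.2 + 1)) p).1.getD x 0
      = p.1.getD x 0 + ((M.filter (fun s => !PySem.Set.contains s none)).map (fun s => (s.count x : Int))).sum
    ∧ (M.foldl (fun (p : PySem.Dict (Option Int) Int × Int) ver_set =>
        if PySem.Set.contains ver_set none then p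
        else (ver_set.foldl (fun d x => d.insert x (d.getD x 0 + 1)) p.1, p.2 + 1)) p).2
      = p.2 + (M.countP (fun s => !PySem.Set.contains s none) : Int) := by
  intro M
  induction M with
  | nil => intro p; simp
  | cons s M ih =>
    intro p
    simp only [List.foldl_cons]
    by_cases hc : PySem.Set.contains s none = true
    · rw [if_pos hc]
      have hm : none ∈ s := (PySem.Set.contains_iff s none).mp hc
      obtain ⟨h1, h2⟩ := ih p
      constructor
      · rw [h1]; simp [hm]
      · rw [h2]; simp [hm]
    · rw [if_neg hc]
      have hm : none ∉ s := fun h => hc ((PySem.Set.contains_iff s none).mpr h)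
      obtain ⟨h1, h2⟩ := ih ((s.foldl (fun d x => d.insert x (d.getD x 0 + 1)) p.1, p.2 + 1))
      constructor
      · rw [h1]
        simp only [PySem.Dict.getD_foldl_insert_add_one]
        rw [List.filter_cons_of_pos (by simp [hm]), List.map_cons, List.sum_cons]
        ring
      · rw [h2]
        rw [List.countP_cons_of_pos (by simp [hm])]
        push_cast
        ring

-- B's survival test equals pvMemAll (inner lists are Nodup)
lemma pv_pred (L : List (List (Option Int))) (hnd : ∀ s ∈ L, s.Nodup) (x : Option Int) :
    ((L.foldl (fun (p : PySem.Dict (Option Int) Int × Int) ver_set =>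
        if PySem.Set.contains ver_set none then p
        else (ver_set.foldl (fun d x => d.insert x (d.getD x 0 + 1)) p.1, p.2 + 1))
        (PySem.Dict.empty, 0)).1.getD x 0
      == (L.foldl (fun (p : PySem.Dict (Option Int) Int × Int) ver_set =>
        if PySem.Set.contains ver_set none then p
        else (ver_set.foldl (fun d x => d.insert x (d.getD x 0 + 1)) p.1, p.2 + 1))
        (PySem.Dict.empty, 0)).2)
      = pvMemAll L x := by
  obtain ⟨h1, h2⟩ := pv_counts x L (PySem.Dict.empty, 0)
  rw [h1, h2]
  have hcount : (L.filter (fun s => !PySem.Set.contains s none)).map (fun s => (s.count x : Int))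
      = (L.filter (fun s => !PySem.Set.contains s none)).map (fun s => if PySem.Set.contains s x then (1 : Int) else 0) := by
    apply List.map_congr_left
    intro s hs
    have hnds : s.Nodup := hnd s (List.mem_filter.mp hs).1
    by_cases hm : x ∈ s
    · simp [List.count_eq_one_of_mem hnds hm, hm]
    · simp [List.count_eq_zero_of_not_mem hm, hm]
  rw [hcount, PySem.List.sum_map_ite_one_zero, pv_memAll_filter]
  dsimp only
  simp only [PySem.Dict.getD_empty, zero_add]
  rw [List.countP_eq_length_filter (p := fun s => !PySem.Set.contains s none)]
  rw [Bool.eq_iff_iff]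
  simp only [beq_iff_eq, Nat.cast_inj, List.countP_eq_length, List.all_eq_true]

-- B's port is the union filtered by pvMemAll
lemma pv_alt_eq (L : List (List (Option Int))) (hnd : ∀ s ∈ L, s.Nodup) :
    intersect_release_segment_sets_alt L = (pvU L).filter (fun x => pvMemAll L x) := by
  unfold intersect_release_segment_sets_alt
  rw [← List.foldl_flatten]
  rw [pv_condAdd_filter _ _ PySem.Set.empty [] rfl]
  unfold pvU
  apply List.filter_congr
  intro x _
  exact pv_pred L hnd x

-- ===== VERDICT (by name: the statement is the Claim_ definition above) =====
theorem intersect_release_segment_sets_spec : Claim_equal_intersect_release_segment_sets := by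
  intro L _ hpre
  obtain ⟨hne, hnd⟩ := hpre
  unfold Spec_intersect_release_segment_sets
  rw [pv_alt_eq L hnd]
  cases L with
  | nil => exact absurd rfl hne
  | cons first rest =>
    have hfn : first.Nodup := hnd first (by simp)
    have hUfr : pvU (first :: rest) = (rest.flatten).foldl PySem.Set.add first := by
      unfold pvU
      rw [List.flatten_cons, List.foldl_append]
      congr 1
      rw [show (first.foldl PySem.Set.add [] : List (Option Int)) = PySem.Set.ofList first from rfl]
      exact PySem.Set.ofList_eq_self_of_nodup first hfn
    show intersect_release_segment_sets (first :: rest) = _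
    simp only [intersect_release_segment_sets]
    split
    · -- len == 1, i.e. rest = []
      rename_i hlen
      simp only [List.length_cons, beq_iff_eq] at hlen
      have hr : rest = [] := List.eq_nil_of_length_eq_zero (by omega)
      subst hr
      rw [hUfr]
      simp only [List.flatten_nil, List.foldl_nil]
      symm
      apply List.filter_eq_self.mpr
      intro x hx
      simp [pvMemAll, hx]
    · split
      · -- some member is empty
        rename_i hany
        symm
        rw [List.filter_eq_nil_iff]
        intro x _ hQ
        simp only [List.any_eq_true, List.length_eq_zero_iff, beq_iff_eq] at hany
        obtain ⟨s, hs, rfl⟩ := hany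
        have := List.all_eq_true.mp hQ [] hs
        simp [PySem.Set.contains] at this
      · split
        · -- all members are {None}
          rename_i hall
          simp only [List.all_eq_true] at hall
          have hall' : ∀ s ∈ first :: rest, s = [none] := by
            intro s hs
            have h := hall s hs
            simp only [Bool.and_eq_true, beq_iff_eq] at h
            obtain ⟨hlen, hc⟩ := h
            match s, hlen with
            | [y], _ =>
              have : none ∈ [y] := (PySem.Set.contains_iff _ _).mp hc
              simp at this
              rw [this]
          have hf := hall' first (by simp)
          subst hf
          have hU : pvU ([(none : Option Int)] :: rest) = [none] := by
            rw [hUfr]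
            apply pv_foldl_add_of_subset
            intro x hx
            obtain ⟨s, hs, hxs⟩ := List.mem_flatten.mp hx
            rw [hall' s (by simp [hs])] at hxs
            simpa using hxs
          rw [hU]
          symm
          apply List.filter_eq_self.mpr
          intro x hx
          simp only [List.mem_singleton] at hx
          subst hx
          simp only [pvMemAll, List.all_eq_true]
          intro s hs
          rw [hall' s hs]
          simp [PySem.Set.contains]
        · -- general case
          rw [pv_interloop_filter]
          by_cases hcf : PySem.Set.contains first none = true
          · rw [if_pos hcf]
            congr 1
            rw [pv_unionfold, hUfr]
          · rw [if_neg hcf]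
            rw [PySem.Set.ofList_eq_self_of_nodup first hfn]
            rw [hUfr]
            obtain ⟨ext, he, hd⟩ := pv_foldl_add_ext rest.flatten first
            rw [he, List.filter_append]
            have hext : ext.filter (fun x => pvMemAll (first :: rest) x) = [] := by
              rw [List.filter_eq_nil_iff]
              intro x hx hQ
              have h := List.all_eq_true.mp hQ first (by simp)
              rw [Bool.or_eq_true] at h
              rcases h with h | h
              · exact hcf h
              · exact hd x hx ((PySem.Set.contains_iff _ _).mp h)
            rw [hext, List.append_nil]
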